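-- pv_equiv track=rewrite | github.com/IDEA-Research-Group/AMADEUS | fm/serializers.py | unroll_xor
-- ===== SOURCE A (Python) =====
-- from collections.abc import Iterable
-- from typing import Union
--
-- def unroll_xor(alternatives: Union[str, Iterable]) -> str:
--     '''
--     Transforms a XOR expression to an IMPLIES-like normal form
--
--     Example: `A XOR B XOR C -> (A AND NOT B AND NOT C) OR (NOT A AND B AND NOT C) OR (NOT A AND NOT B AND C)`
--     '''
--     unrolled = list()
--     for i in range(len(alternatives)):
--         temp = list()
--         for j, alt in enumerate(alternatives):
--             if i != j:
--                 temp.append("NOT " + alt)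
--             else:
--                 temp.append(alt)
--         unrolled.append('(' + ' AND '.join(temp) + ')')
--
--     if len(unrolled) > 1:
--         return '(' + ' OR '.join(unrolled) + ')'
--     else:
--         return unrolled[0]
-- ===== SOURCE B (Python) =====
-- def unroll_xor(alternatives):
--     def clauses(alts):
--         # recursively: first clause has the head positive and all the rest negated;
--         # the remaining clauses are the clauses of the tail, each prefixed by 'NOT head'
--         if not alts:
--             return []
--         head, rest = alts[0], alts[1:]
--         first = ' AND '.join([head] + ['NOT ' + r for r in rest])
--         return [first] + ['NOT ' + head + ' AND ' + c for c in clauses(rest)]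
--     body = ['(' + c + ')' for c in clauses(list(alternatives))]
--     if len(body) > 1:
--         return '(' + ' OR '.join(body) + ')'
--     return body[0]
-- ===== Notes on version B (the rewrite author's own statement) =====
-- stated objective: alternative
-- what changed: B builds the clause list by structural recursion on the alternatives (first clause = head positive with rest negated; remaining clauses = clauses of the tail each prefixed by 'NOT head'), instead of A's index loop with an inner enumerate scan testing i != j.
import Mathlib
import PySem

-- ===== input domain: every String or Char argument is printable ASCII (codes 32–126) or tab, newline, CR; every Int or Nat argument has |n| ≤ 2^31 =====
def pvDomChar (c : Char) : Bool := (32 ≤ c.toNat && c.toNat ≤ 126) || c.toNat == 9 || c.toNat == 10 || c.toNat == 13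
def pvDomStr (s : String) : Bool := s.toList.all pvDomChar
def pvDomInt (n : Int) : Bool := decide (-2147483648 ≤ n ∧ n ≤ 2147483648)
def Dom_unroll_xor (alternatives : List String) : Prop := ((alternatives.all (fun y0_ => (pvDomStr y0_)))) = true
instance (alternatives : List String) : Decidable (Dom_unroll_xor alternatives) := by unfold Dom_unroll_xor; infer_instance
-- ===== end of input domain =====

-- B computes the clause list by structural recursion on the alternatives (head-positive clause,
-- then the tail's clauses each prefixed by 'NOT head') instead of A's index loop with an inner
-- enumerate scan; an alternative decomposition of the same cost.

-- ===== PORT A =====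
def unroll_xor (alternatives : List String) : String :=
  let unrolled := (PySem.List.pyRange 0 (alternatives.length : Int) 1).map (fun i =>
    let temp := (PySem.List.enumerate alternatives 0).map (fun ja =>
      if i ≠ ja.1 then "NOT " ++ ja.2 else ja.2)
    "(" ++ PySem.Str.join " AND " temp ++ ")")
  if unrolled.length > 1 then "(" ++ PySem.Str.join " OR " unrolled ++ ")"
  else (PySem.List.pyGet? unrolled 0).getD ""   -- unrolled[0]; [] (IndexError) is outside Pre_

-- ===== PORT B =====
-- recursive clause builder of Source B's inner function `clauses`
def clausesRec : List String → List String
  | [] => []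
  | h :: t =>
      PySem.Str.join " AND " (h :: t.map (fun r => "NOT " ++ r))
        :: (clausesRec t).map (fun c => "NOT " ++ h ++ " AND " ++ c)

def unroll_xor_alt (alternatives : List String) : String :=
  let body := (clausesRec alternatives).map (fun c => "(" ++ c ++ ")")
  if body.length > 1 then "(" ++ PySem.Str.join " OR " body ++ ")"
  else (PySem.List.pyGet? body 0).getD ""   -- body[0]; [] (IndexError) is outside Pre_

-- ===== PRECONDITION & SPEC =====
-- A (and B) raises IndexError on the empty list (unrolled[0]); that input is excluded.
def Pre_unroll_xor (alternatives : List String) : Prop := alternatives ≠ []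
instance (alternatives : List String) : Decidable (Pre_unroll_xor alternatives) := by unfold Pre_unroll_xor; infer_instance
def pvWitness_unroll_xor : List String := ["A", "B", "C"]

def Spec_unroll_xor (alternatives : List String) (out : String) : Prop := out = unroll_xor_alt alternatives
instance (alternatives : List String) (out : String) : Decidable (Spec_unroll_xor alternatives out) := by unfold Spec_unroll_xor; infer_instance

-- ===== CLAIM (what is proved, stated in full; the proofs are below) =====
def Claim_equal_unroll_xor : Prop := ∀ (alternatives : List String), Dom_unroll_xor alternatives → Pre_unroll_xor alternatives → Spec_unroll_xor alternatives (unroll_xor alternatives)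

-- ===== LEMMAS AND PROOFS =====

theorem join_cons_cons (sep a b : String) (l : List String) :
    PySem.Str.join sep (a :: b :: l) = a ++ sep ++ PySem.Str.join sep (b :: l) := by
  have h : (PySem.Str.join sep (a :: b :: l)).toList
      = (a ++ sep ++ PySem.Str.join sep (b :: l)).toList := by
    simp [PySem.Str.toList_join, PySem.Chars.join_cons_cons]
  exact String.toList_inj.mp h

-- If every index in (enumerate l s) is ≠ i (because i < s), A's inner map negates everything.
theorem enumMap_all_ne (l : List String) (s i : Int) (h : i < s) :
    (PySem.List.enumerate l s).map (fun ja => if i ≠ ja.1 then "NOT " ++ ja.2 else ja.2)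
      = l.map (fun a => "NOT " ++ a) := by
  induction l generalizing s with
  | nil => simp [PySem.List.enumerate_nil]
  | cons x xs ih =>
    rw [PySem.List.enumerate_cons]
    simp only [List.map_cons]
    rw [if_pos (by omega : i ≠ s), ih (s + 1) (by omega)]

-- A's clause-body list over range(s, s+len l) equals B's recursive clause list.
theorem bodies_eq (l : List String) (s : Int) :
    (PySem.List.pyRange s (s + (l.length : Int)) 1).map (fun i =>
      PySem.Str.join " AND " ((PySem.List.enumerate l s).map (fun ja =>
        if i ≠ ja.1 then "NOT " ++ ja.2 else ja.2)))
      = clausesRec l := by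
  induction l generalizing s with
  | nil => simp [PySem.List.pyRange_one_eq_nil, clausesRec]
  | cons h t ih =>
    rw [PySem.List.pyRange_one_cons (by simp only [List.length_cons]; push_cast; omega), List.map_cons]
    congr 1
    · rw [PySem.List.enumerate_cons, List.map_cons,
        if_neg (by simp), enumMap_all_ne t (s + 1) s (by omega)]
    · cases t with
      | nil =>
        rw [show s + (((h :: ([] : List String)).length : Nat) : Int) = s + 1 by simp,
          PySem.List.pyRange_one_eq_nil le_rfl]
        simp [clausesRec]
      | cons x xs =>
        rw [← ih (s + 1), List.map_map,
          show s + (((h :: x :: xs).length : Nat) : Int) = (s + 1) + ((x :: xs).length : Int) by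
            simp only [List.length_cons]; push_cast; ring]
        apply List.map_congr_left
        intro i hi
        have hs := (PySem.List.mem_pyRange_one).mp hi
        simp only [Function.comp_apply]
        rw [PySem.List.enumerate_cons, List.map_cons,
          if_pos (by omega : i ≠ s),
          PySem.List.enumerate_cons, List.map_cons, join_cons_cons]

-- ===== VERDICT (by name: the statement is the Claim_ definition above) =====
theorem unroll_xor_spec : Claim_equal_unroll_xor := by
  intro alts _ _
  unfold Spec_unroll_xor unroll_xor unroll_xor_alt
  have h := bodies_eq alts 0
  rw [zero_add] at h
  have hmain :
      (PySem.List.pyRange 0 (alts.length : Int) 1).map (fun i =>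
        "(" ++ PySem.Str.join " AND "
          ((PySem.List.enumerate alts 0).map (fun ja =>
            if i ≠ ja.1 then "NOT " ++ ja.2 else ja.2)) ++ ")")
      = (clausesRec alts).map (fun c => "(" ++ c ++ ")") := by
    rw [← h, List.map_map]
    rfl
  rw [hmain]
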